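-- pv_equiv track=rewrite | github.com/jpowerj/mturk-twostage | code/gen_pdb_html.py | gen_preview_html
-- ===== SOURCE A (Python) =====
-- preview_pdfs = [
--     "https://cs.stanford.edu/~jjacobs3/pdb/DOC_0005958911.pdf", #1
--     "https://cs.stanford.edu/~jjacobs3/pdb/DOC_0005958912.pdf", #2
--     "https://cs.stanford.edu/~jjacobs3/pdb/DOC_0005958913.pdf", #3
--     "https://cs.stanford.edu/~jjacobs3/pdb/DOC_0005958914.pdf", #4
--     "https://cs.stanford.edu/~jjacobs3/pdb/DOC_0005958915.pdf", # 5
--     "https://cs.stanford.edu/~jjacobs3/pdb/DOC_0005958916.pdf", # 6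
--     "https://cs.stanford.edu/~jjacobs3/pdb/DOC_0005958918.pdf", # 7
--     "https://cs.stanford.edu/~jjacobs3/pdb/DOC_0005958920.pdf", # 8
--     "https://cs.stanford.edu/~jjacobs3/pdb/DOC_0005958922.pdf", # 9
--     "https://cs.stanford.edu/~jjacobs3/pdb/DOC_0005958924.pdf", # 10
--     "https://cs.stanford.edu/~jjacobs3/pdb/DOC_0005958926.pdf", # 11
--     "https://cs.stanford.edu/~jjacobs3/pdb/DOC_0005958929.pdf", # 12
--     "https://cs.stanford.edu/~jjacobs3/pdb/DOC_0005958931.pdf", # 13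
-- ]
--
-- def gen_preview_html(base_html):
--     # Also a "preview" version, which just adds in <html>, <head>, etc.
--     preview_start = """
--         <!DOCTYPE html>
--         <html>
--             <head>
--                 <title>Preview</title>
--                 <meta content="text/html;charset=utf-8" http-equiv="Content-Type">
--                 <meta content="utf-8" http-equiv="encoding">
--             </head>
--             <body>
--             <script>
--                 var isPreview = true;
--                 //function turkGetParam(requestedVar, defaultVal) {
--                 //    if (requestedVar == "assignmentId") {
--                 //        return "previewassignment";
--                 //    } else {
--                 //        return "previewuser";
--                 //    }
--                 //}
--             </script>
--     """
--     preview_end = """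
--             </body>
--         </html>
--     """
--     preview_html = preview_start + base_html + preview_end
--     # Also fill in the pdf urls
--     for pdf_num in range(1,14):
--         preview_html = preview_html.replace("${pdf" + str(pdf_num) + "}", preview_pdfs[pdf_num-1])
--     return preview_html
-- ===== SOURCE B (Python) =====
-- preview_pdfs = [
--     "https://cs.stanford.edu/~jjacobs3/pdb/DOC_0005958911.pdf", #1
--     "https://cs.stanford.edu/~jjacobs3/pdb/DOC_0005958912.pdf", #2
--     "https://cs.stanford.edu/~jjacobs3/pdb/DOC_0005958913.pdf", #3
--     "https://cs.stanford.edu/~jjacobs3/pdb/DOC_0005958914.pdf", #4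
--     "https://cs.stanford.edu/~jjacobs3/pdb/DOC_0005958915.pdf", # 5
--     "https://cs.stanford.edu/~jjacobs3/pdb/DOC_0005958916.pdf", # 6
--     "https://cs.stanford.edu/~jjacobs3/pdb/DOC_0005958918.pdf", # 7
--     "https://cs.stanford.edu/~jjacobs3/pdb/DOC_0005958920.pdf", # 8
--     "https://cs.stanford.edu/~jjacobs3/pdb/DOC_0005958922.pdf", # 9
--     "https://cs.stanford.edu/~jjacobs3/pdb/DOC_0005958924.pdf", # 10
--     "https://cs.stanford.edu/~jjacobs3/pdb/DOC_0005958926.pdf", # 11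
--     "https://cs.stanford.edu/~jjacobs3/pdb/DOC_0005958929.pdf", # 12
--     "https://cs.stanford.edu/~jjacobs3/pdb/DOC_0005958931.pdf", # 13
-- ]
--
-- # placeholder -> URL table; two-digit placeholders first so the scan tries
-- # the longer match before ${pdf1}
-- _PLACEHOLDERS = [("${pdf%d}" % k, preview_pdfs[k - 1]) for k in range(13, 0, -1)]
--
-- def gen_preview_html(base_html):
--     # Also a "preview" version, which just adds in <html>, <head>, etc.
--     preview_start = """
--         <!DOCTYPE html>
--         <html>
--             <head>
--                 <title>Preview</title>
--                 <meta content="text/html;charset=utf-8" http-equiv="Content-Type">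
--                 <meta content="utf-8" http-equiv="encoding">
--             </head>
--             <body>
--             <script>
--                 var isPreview = true;
--                 //function turkGetParam(requestedVar, defaultVal) {
--                 //    if (requestedVar == "assignmentId") {
--                 //        return "previewassignment";
--                 //    } else {
--                 //        return "previewuser";
--                 //    }
--                 //}
--             </script>
--     """
--     preview_end = """
--             </body>
--         </html>
--     """
--     s = preview_start + base_html + preview_end
--     # One left-to-right pass: substitute each placeholder as it is met.
--     out = []
--     i = 0
--     n = len(s)
--     while i < n:
--         for pat, url in _PLACEHOLDERS:
--             if s.startswith(pat, i):
--                 out.append(url)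
--                 i += len(pat)
--                 break
--         else:
--             out.append(s[i])
--             i += 1
--     return "".join(out)
-- ===== Notes on version B (the rewrite author's own statement) =====
-- stated objective: alternative
-- what changed: Replaced the 13 sequential full-string .replace passes by a single left-to-right scan that looks each placeholder up in a table (two-digit placeholders tried first) and emits the output once.
import Mathlib
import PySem

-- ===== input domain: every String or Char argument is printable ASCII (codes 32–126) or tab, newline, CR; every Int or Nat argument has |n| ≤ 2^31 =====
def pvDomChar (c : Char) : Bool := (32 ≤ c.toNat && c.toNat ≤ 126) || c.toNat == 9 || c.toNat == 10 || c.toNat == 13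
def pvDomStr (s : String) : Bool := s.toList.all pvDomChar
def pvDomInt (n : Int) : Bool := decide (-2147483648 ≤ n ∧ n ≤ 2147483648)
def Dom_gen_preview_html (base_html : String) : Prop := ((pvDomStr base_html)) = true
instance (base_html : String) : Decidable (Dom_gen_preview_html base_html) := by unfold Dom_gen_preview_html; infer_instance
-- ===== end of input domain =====

-- B replaces A's 13 sequential full-string .replace passes by one left-to-right scan that
-- substitutes each placeholder from a table as it is met (alternative algorithm, same result).

-- ===== PORT A =====
def preview_pdfs : List String := [
    "https://cs.stanford.edu/~jjacobs3/pdb/DOC_0005958911.pdf",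
    "https://cs.stanford.edu/~jjacobs3/pdb/DOC_0005958912.pdf",
    "https://cs.stanford.edu/~jjacobs3/pdb/DOC_0005958913.pdf",
    "https://cs.stanford.edu/~jjacobs3/pdb/DOC_0005958914.pdf",
    "https://cs.stanford.edu/~jjacobs3/pdb/DOC_0005958915.pdf",
    "https://cs.stanford.edu/~jjacobs3/pdb/DOC_0005958916.pdf",
    "https://cs.stanford.edu/~jjacobs3/pdb/DOC_0005958918.pdf",
    "https://cs.stanford.edu/~jjacobs3/pdb/DOC_0005958920.pdf",
    "https://cs.stanford.edu/~jjacobs3/pdb/DOC_0005958922.pdf",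
    "https://cs.stanford.edu/~jjacobs3/pdb/DOC_0005958924.pdf",
    "https://cs.stanford.edu/~jjacobs3/pdb/DOC_0005958926.pdf",
    "https://cs.stanford.edu/~jjacobs3/pdb/DOC_0005958929.pdf",
    "https://cs.stanford.edu/~jjacobs3/pdb/DOC_0005958931.pdf"
]

def gen_preview_html (base_html : String) : String :=
  let preview_start : String := "\n        <!DOCTYPE html>\n        <html>\n            <head>\n                <title>Preview</title>\n                <meta content=\"text/html;charset=utf-8\" http-equiv=\"Content-Type\">\n                <meta content=\"utf-8\" http-equiv=\"encoding\">\n            </head>\n            <body>\n            <script>\n                var isPreview = true;\n                //function turkGetParam(requestedVar, defaultVal) {\n                //    if (requestedVar == \"assignmentId\") {\n                //        return \"previewassignment\";\n                //    } else {\n                //        return \"previewuser\";\n                //    }\n                //}\n            </script>\n    "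
  let preview_end : String := "\n            </body>\n        </html>\n    "
  let preview_html := preview_start ++ base_html ++ preview_end
  (PySem.List.pyRange 1 14 1).foldl
    (fun acc pdf_num =>
      PySem.Str.replace acc ("${pdf" ++ PySem.Int.toStr pdf_num ++ "}")
        (PySem.List.pyGetD preview_pdfs (pdf_num - 1) ""))
    preview_html


-- ===== PORT B =====
def pvPlaceholders : List (List Char × List Char) := [
    ("${pdf13}".toList, "https://cs.stanford.edu/~jjacobs3/pdb/DOC_0005958931.pdf".toList),
    ("${pdf12}".toList, "https://cs.stanford.edu/~jjacobs3/pdb/DOC_0005958929.pdf".toList),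
    ("${pdf11}".toList, "https://cs.stanford.edu/~jjacobs3/pdb/DOC_0005958926.pdf".toList),
    ("${pdf10}".toList, "https://cs.stanford.edu/~jjacobs3/pdb/DOC_0005958924.pdf".toList),
    ("${pdf9}".toList, "https://cs.stanford.edu/~jjacobs3/pdb/DOC_0005958922.pdf".toList),
    ("${pdf8}".toList, "https://cs.stanford.edu/~jjacobs3/pdb/DOC_0005958920.pdf".toList),
    ("${pdf7}".toList, "https://cs.stanford.edu/~jjacobs3/pdb/DOC_0005958918.pdf".toList),
    ("${pdf6}".toList, "https://cs.stanford.edu/~jjacobs3/pdb/DOC_0005958916.pdf".toList),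
    ("${pdf5}".toList, "https://cs.stanford.edu/~jjacobs3/pdb/DOC_0005958915.pdf".toList),
    ("${pdf4}".toList, "https://cs.stanford.edu/~jjacobs3/pdb/DOC_0005958914.pdf".toList),
    ("${pdf3}".toList, "https://cs.stanford.edu/~jjacobs3/pdb/DOC_0005958913.pdf".toList),
    ("${pdf2}".toList, "https://cs.stanford.edu/~jjacobs3/pdb/DOC_0005958912.pdf".toList),
    ("${pdf1}".toList, "https://cs.stanford.edu/~jjacobs3/pdb/DOC_0005958911.pdf".toList)
]

def pvScan (s : List Char) : List Char :=
  match s with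
  | [] => []
  | c :: t =>
    match pvPlaceholders.find? (fun pr => pr.1.isPrefixOf (c :: t)) with
    | some pr => pr.2 ++ pvScan (t.drop (pr.1.length - 1))
    | none => c :: pvScan t
termination_by s.length
decreasing_by all_goals simp

def gen_preview_html_alt (base_html : String) : String :=
  let preview_start : String := "\n        <!DOCTYPE html>\n        <html>\n            <head>\n                <title>Preview</title>\n                <meta content=\"text/html;charset=utf-8\" http-equiv=\"Content-Type\">\n                <meta content=\"utf-8\" http-equiv=\"encoding\">\n            </head>\n            <body>\n            <script>\n                var isPreview = true;\n                //function turkGetParam(requestedVar, defaultVal) {\n                //    if (requestedVar == \"assignmentId\") {\n                //        return \"previewassignment\";\n                //    } else {\n                //        return \"previewuser\";\n                //    }\n                //}\n            </script>\n    "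
  let preview_end : String := "\n            </body>\n        </html>\n    "
  let s := preview_start ++ base_html ++ preview_end
  String.ofList (pvScan s.toList)

-- ===== PRECONDITION & SPEC =====
def Spec_gen_preview_html (base_html : String) (out : String) : Prop := out = gen_preview_html_alt base_html
instance (base_html : String) (out : String) : Decidable (Spec_gen_preview_html base_html out) := by unfold Spec_gen_preview_html; infer_instance

-- ===== CLAIM (what is proved, stated in full; the proofs are below) =====
def Claim_equal_gen_preview_html : Prop := ∀ (base_html : String), Dom_gen_preview_html base_html → Spec_gen_preview_html base_html (gen_preview_html base_html)

-- ===== LEMMAS AND PROOFS =====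
lemma go_acc (old new : List Char) (fuel : Nat) (l acc : List Char) :
    PySem.Chars.replace.go old new fuel l acc = acc.reverse ++ PySem.Chars.replace.go old new fuel l [] := by
  induction fuel generalizing l acc with
  | zero => simp [PySem.Chars.replace.go]
  | succ n ih =>
    cases l with
    | nil => simp [PySem.Chars.replace.go]
    | cons c t =>
      simp only [PySem.Chars.replace.go]
      split
      · rw [ih (List.drop old.length (c :: t)) (new.reverse ++ acc),
            ih (List.drop old.length (c :: t)) (new.reverse ++ [])]
        simp
      · rw [ih t (c :: acc), ih t (c :: [])]; simp

lemma go_fuel (old new : List Char) (hold : old ≠ []) :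
    ∀ (f1 f2 : Nat) (l : List Char), l.length ≤ f1 → l.length ≤ f2 →
      PySem.Chars.replace.go old new f1 l [] = PySem.Chars.replace.go old new f2 l [] := by
  intro f1
  induction f1 using Nat.strong_induction_on with
  | _ f1 ih =>
    intro f2 l h1 h2
    cases l with
    | nil => cases f1 <;> cases f2 <;> simp [PySem.Chars.replace.go]
    | cons c t =>
      obtain ⟨f1, rfl⟩ : ∃ g, f1 = g + 1 := ⟨f1 - 1, by simp at h1; omega⟩
      obtain ⟨f2, rfl⟩ : ∃ g, f2 = g + 1 := ⟨f2 - 1, by simp at h2; omega⟩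
      simp only [PySem.Chars.replace.go]
      split
      · rename_i hpre
        have hlen : old.length ≥ 1 := List.length_pos_of_ne_nil hold
        have hple : old.length ≤ (c::t).length := (List.isPrefixOf_iff_prefix.mp hpre).length_le
        have hd : (List.drop old.length (c :: t)).length ≤ f1 := by
          simp only [List.length_drop, List.length_cons] at h1 ⊢; simp at h1; omega
        have hd2 : (List.drop old.length (c :: t)).length ≤ f2 := by
          simp only [List.length_drop, List.length_cons] at h2 ⊢; simp at h2; omega
        rw [go_acc _ _ f1, go_acc _ _ f2, ih f1 (by omega) f2 _ hd hd2]
      · have hh1 : t.length ≤ f1 := by simp at h1; omega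
        have hh2 : t.length ≤ f2 := by simp at h2; omega
        rw [go_acc _ _ f1 t, go_acc _ _ f2 t, ih f1 (by omega) f2 t hh1 hh2]

lemma replace_nil (old new : List Char) (hold : old ≠ []) :
    PySem.Chars.replace [] old new = [] := by
  simp [PySem.Chars.replace, PySem.Chars.replace.go, List.isEmpty_iff, hold]

lemma replace_cons_no (old new : List Char) (hold : old ≠ []) (c : Char) (t : List Char)
    (h : ¬ old <+: (c :: t)) :
    PySem.Chars.replace (c :: t) old new = c :: PySem.Chars.replace t old new := by
  have hb : old.isPrefixOf (c :: t) = false := by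
    rw [← Bool.not_eq_true, List.isPrefixOf_iff_prefix]; exact h
  have hne : old.isEmpty = false := by simp [hold]
  simp only [PySem.Chars.replace, hne, Bool.false_eq_true, if_false, List.length_cons]
  conv_lhs => rw [show t.length + 1 = Nat.succ t.length from rfl]
  simp only [PySem.Chars.replace.go, hb, Bool.false_eq_true, if_false]
  rw [go_acc]
  simp

lemma replace_prefix (old new : List Char) (hold : old ≠ []) (l : List Char)
    (h : old <+: l) :
    PySem.Chars.replace l old new = new ++ PySem.Chars.replace (l.drop old.length) old new := by
  have hlen : old.length ≥ 1 := List.length_pos_of_ne_nil hold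
  have hple : old.length ≤ l.length := h.length_le
  obtain ⟨c, t, rfl⟩ : ∃ c t, l = c :: t := by
    cases l
    · simp only [List.length_nil, Nat.le_zero] at hple; omega
    · exact ⟨_, _, rfl⟩
  have hb : old.isPrefixOf (c :: t) = true := List.isPrefixOf_iff_prefix.mpr h
  have hne : old.isEmpty = false := by simp [hold]
  simp only [PySem.Chars.replace, hne, Bool.false_eq_true, if_false, List.length_cons]
  conv_lhs => rw [show t.length + 1 = Nat.succ t.length from rfl]
  simp only [PySem.Chars.replace.go, hb, if_true]
  rw [go_acc]
  simp only [List.reverse_reverse, List.append_nil]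
  congr 1
  exact go_fuel old new hold t.length (List.drop old.length (c :: t)).length _
    (by simp; omega) (le_refl _)

lemma replace_skip_nodollar (q new : List Char) :
    ∀ (v x : List Char), (∀ c ∈ v, c ≠ '$') →
      PySem.Chars.replace (v ++ x) ('$'::q) new = v ++ PySem.Chars.replace x ('$'::q) new := by
  intro v
  induction v with
  | nil => simp
  | cons c v' ih =>
    intro x hv
    have hc : c ≠ '$' := hv c (by simp)
    have hno : ¬ ('$'::q) <+: (c :: (v' ++ x)) := by
      intro hp
      rcases List.cons_prefix_cons.mp hp with ⟨h1, -⟩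
      exact hc h1.symm
    rw [List.cons_append, replace_cons_no _ new (by simp) c (v' ++ x) hno,
        ih x (fun d hd => hv d (by simp [hd]))]
    rfl

inductive PvTok where
  | ch : Char → PvTok
  | ph : List Char × List Char → PvTok

def pvRebuild : List PvTok → List Char
  | [] => []
  | .ch c :: ts => c :: pvRebuild ts
  | .ph pr :: ts => pr.1 ++ pvRebuild ts

def pvRender (done : List (List Char × List Char)) : List PvTok → List Char
  | [] => []
  | .ch c :: ts => c :: pvRender done ts
  | .ph pr :: ts => (if pr ∈ done then pr.2 else pr.1) ++ pvRender done ts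

def pvWF : List PvTok → Prop
  | [] => True
  | .ch c :: ts => (∀ pr ∈ pvPlaceholders, ¬ pr.1 <+: (c :: pvRebuild ts)) ∧ pvWF ts
  | .ph pr :: ts => pr ∈ pvPlaceholders ∧ pvWF ts

def pvParse (s : List Char) : List PvTok :=
  match s with
  | [] => []
  | c :: t =>
    match pvPlaceholders.find? (fun pr => pr.1.isPrefixOf (c :: t)) with
    | some pr => .ph pr :: pvParse (t.drop (pr.1.length - 1))
    | none => .ch c :: pvParse t
termination_by s.length
decreasing_by all_goals simp

lemma pv_fact1b : (pvPlaceholders.all (fun pr =>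
    !pr.1.isEmpty && !pr.1.tail.isEmpty && pr.1.head? == some '$' &&
    pr.1.tail.all (fun c => c != '$' && c != 'h') &&
    pr.2.all (fun c => c != '$') && pr.2.head? == some 'h')) = true := by decide

lemma pv_fact1 : ∀ pr ∈ pvPlaceholders, pr.1 ≠ [] ∧ pr.1.tail ≠ [] ∧ pr.1.head? = some '$' ∧
    (∀ c ∈ pr.1.tail, c ≠ '$' ∧ c ≠ 'h') ∧ (∀ c ∈ pr.2, c ≠ '$') ∧ pr.2.head? = some 'h' := by
  have h := pv_fact1b
  simp only [List.all_eq_true, Bool.and_eq_true, beq_iff_eq, bne_iff_ne, ne_eq,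
    Bool.not_eq_true', List.isEmpty_eq_false_iff] at h
  intro pr hpr
  rcases h pr hpr with ⟨⟨⟨⟨⟨h1, h1t⟩, h2⟩, h3⟩, h4⟩, h5⟩
  exact ⟨h1, h1t, h2, fun c hc => h3 c hc, h4, h5⟩

lemma pv_fact2b : (pvPlaceholders.all (fun pr => pvPlaceholders.all
    (fun qr => pr == qr || !pr.1.isPrefixOf qr.1))) = true := by decide

lemma pv_fact2 : ∀ pr ∈ pvPlaceholders, ∀ qr ∈ pvPlaceholders, pr ≠ qr → ¬ pr.1 <+: qr.1 := by
  have h := pv_fact2b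
  simp only [List.all_eq_true, Bool.or_eq_true, beq_iff_eq, Bool.not_eq_true',
    ← Bool.not_eq_true, List.isPrefixOf_iff_prefix] at h
  intro pr hpr qr hqr hne hp
  rcases h pr hpr qr hqr with h' | h'
  · exact hne h'
  · exact h' hp

lemma pv_transfer (done : List (List Char × List Char)) :
    ∀ (ts : List PvTok) (q : List Char), pvWF ts → q ≠ [] → (∀ c ∈ q, c ≠ '$' ∧ c ≠ 'h') →
      q <+: pvRender done ts → q <+: pvRebuild ts := by
  intro ts
  induction ts with
  | nil =>
    intro q _ hne _ hp
    exact absurd (List.prefix_nil.mp hp) hne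
  | cons tk ts ih =>
    intro q hwf hne hch hp
    cases tk with
    | ch c =>
      obtain ⟨a, q', rfl⟩ : ∃ a q', q = a :: q' := by
        cases q with
        | nil => exact absurd rfl hne
        | cons a q' => exact ⟨_, _, rfl⟩
      simp only [pvRender] at hp
      rcases List.cons_prefix_cons.mp hp with ⟨rfl, hq'⟩
      simp only [pvRebuild]
      rw [List.cons_prefix_cons]
      refine ⟨rfl, ?_⟩
      cases q' with
      | nil => exact List.nil_prefix
      | cons b q'' =>
        exact ih _ hwf.2 (by simp) (fun d hd => hch d (by simp [hd])) hq'
    | ph pr =>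
      have hpr : pr ∈ pvPlaceholders := hwf.1
      obtain ⟨a, q', rfl⟩ : ∃ a q', q = a :: q' := by
        cases q with
        | nil => exact absurd rfl hne
        | cons a q' => exact ⟨_, _, rfl⟩
      simp only [pvRender] at hp
      exfalso
      rcases pv_fact1 pr hpr with ⟨-, -, hph, -, -, huh⟩
      by_cases hmem : pr ∈ done
      · obtain ⟨b, v', hv⟩ : ∃ b v', pr.2 = b :: v' := by
          cases hv2 : pr.2 with
          | nil => rw [hv2] at huh; simp at huh
          | cons b v' => exact ⟨_, _, rfl⟩
        rw [if_pos hmem, hv, List.cons_append] at hp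
        rcases List.cons_prefix_cons.mp hp with ⟨rfl, -⟩
        have ha : a = 'h' := by rw [hv] at huh; simpa using huh
        exact (hch a (by simp)).2 ha
      · obtain ⟨b, v', hv⟩ : ∃ b v', pr.1 = b :: v' := by
          cases hv2 : pr.1 with
          | nil => rw [hv2] at hph; simp at hph
          | cons b v' => exact ⟨_, _, rfl⟩
        rw [if_neg hmem, hv, List.cons_append] at hp
        rcases List.cons_prefix_cons.mp hp with ⟨rfl, -⟩
        have ha : a = '$' := by rw [hv] at hph; simpa using hph
        exact (hch a (by simp)).1 ha

lemma head_dollar_split (l : List Char) (h : l.head? = some '$') : ∃ tl, l = '$' :: tl := by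
  cases l with
  | nil => simp at h
  | cons b tl => simp at h; exact ⟨tl, by rw [h]⟩

lemma render_step (pr : List Char × List Char) (hpr : pr ∈ pvPlaceholders)
    (done : List (List Char × List Char)) (hnd : pr ∉ done) :
    ∀ ts, pvWF ts →
      PySem.Chars.replace (pvRender done ts) pr.1 pr.2 = pvRender (pr :: done) ts := by
  obtain ⟨hp1ne, hp1t, hp1h, hp1tail, hp2nd, -⟩ := pv_fact1 pr hpr
  obtain ⟨ptl, hsplit⟩ := head_dollar_split pr.1 hp1h
  have hptlne : ptl ≠ [] := by rw [hsplit] at hp1t; simpa using hp1t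
  have hptlch : ∀ c ∈ ptl, c ≠ '$' ∧ c ≠ 'h' := by
    intro c hc; exact hp1tail c (by rw [hsplit]; simpa using hc)
  intro ts
  induction ts with
  | nil => intro _; simpa [pvRender] using replace_nil pr.1 pr.2 hp1ne
  | cons tk ts ih =>
    intro hwf
    cases tk with
    | ch c =>
      have hnop : ¬ pr.1 <+: (c :: pvRender done ts) := by
        intro hp
        rw [hsplit] at hp
        rcases List.cons_prefix_cons.mp hp with ⟨hcd, htl⟩
        have htr := pv_transfer done ts ptl hwf.2 hptlne hptlch htl
        exact hwf.1 pr hpr (by rw [hsplit]; exact List.cons_prefix_cons.mpr ⟨hcd, htr⟩)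
      simp only [pvRender]
      rw [replace_cons_no pr.1 pr.2 hp1ne c _ hnop, ih hwf.2]
    | ph qr =>
      obtain ⟨hqr, hwf'⟩ := hwf
      by_cases heq : qr = pr
      · subst heq
        simp only [pvRender, if_neg hnd, if_pos (List.mem_cons_self)]
        rw [replace_prefix qr.1 qr.2 hp1ne _ (List.prefix_append qr.1 _),
            List.drop_left, ih hwf']
      · by_cases hmem : qr ∈ done
        · have hq2 := (pv_fact1 qr hqr).2.2.2.2.1
          simp only [pvRender, if_pos hmem, if_pos (List.mem_cons_of_mem pr hmem)]
          rw [hsplit, replace_skip_nodollar ptl pr.2 qr.2 _ hq2, ← hsplit, ih hwf']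
        · obtain ⟨hq1ne, hq1t, hq1h, hq1tail, -, -⟩ := pv_fact1 qr hqr
          obtain ⟨qtl, hqsplit⟩ := head_dollar_split qr.1 hq1h
          have hmem' : qr ∉ pr :: done := by
            simp only [List.mem_cons]; rintro (h | h); exact heq h; exact hmem h
          simp only [pvRender, if_neg hmem, if_neg hmem']
          have hnop : ¬ pr.1 <+: (qr.1 ++ pvRender done ts) := by
            intro hp
            rcases List.prefix_or_prefix_of_prefix hp (List.prefix_append qr.1 _) with h' | h'
            · exact pv_fact2 pr hpr qr hqr (fun he => heq he.symm) h'
            · exact pv_fact2 qr hqr pr hpr heq h'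
          rw [hqsplit, List.cons_append,
              replace_cons_no pr.1 pr.2 hp1ne '$' _ (by rw [hqsplit, List.cons_append] at hnop; exact hnop)]
          rw [hsplit, replace_skip_nodollar ptl pr.2 qtl _
                (fun c hc => (hq1tail c (by rw [hqsplit]; simpa using hc)).1),
              ← hsplit, ih hwf', List.cons_append]

lemma rebuild_parse : ∀ s, pvRebuild (pvParse s) = s := by
  intro s
  fun_induction pvParse s with
  | case1 => rfl
  | case2 c t pr hfind ih =>
    have hmem := List.mem_of_find?_eq_some hfind
    have hpre : pr.1 <+: (c :: t) := by
      have := List.find?_some hfind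
      exact List.isPrefixOf_iff_prefix.mp (by simpa using this)
    obtain ⟨rest, hrest⟩ := hpre
    have hlen : pr.1.length ≥ 1 := List.length_pos_of_ne_nil (pv_fact1 pr hmem).1
    have hdrop : t.drop (pr.1.length - 1) = rest := by
      have h2 := congrArg (List.drop pr.1.length) hrest
      rw [List.drop_left] at h2
      rw [h2]
      cases hl : pr.1.length with
      | zero => omega
      | succ n => simp
    simp only [pvRebuild]
    rw [ih, hdrop]
    exact hrest
  | case3 c t hfind ih => simp [pvRebuild, ih]

lemma wf_parse : ∀ s, pvWF (pvParse s) := by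
  intro s
  fun_induction pvParse s with
  | case1 => trivial
  | case2 c t pr hfind ih => exact ⟨List.mem_of_find?_eq_some hfind, ih⟩
  | case3 c t hfind ih =>
    refine ⟨?_, ih⟩
    intro pr hpr hp
    rw [rebuild_parse] at hp
    have hn := List.find?_eq_none.mp hfind pr hpr
    rw [Bool.not_eq_true, ← Bool.not_eq_true, List.isPrefixOf_iff_prefix] at hn
    exact hn hp

lemma scan_render : ∀ s, pvScan s = pvRender pvPlaceholders (pvParse s) := by
  intro s
  fun_induction pvScan s with
  | case1 => simp [pvParse, pvRender]
  | case2 c t pr hfind ih =>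
    have hmem := List.mem_of_find?_eq_some hfind
    rw [pvParse]
    rw [hfind]
    simp only [pvRender, if_pos hmem, ih]
  | case3 c t hfind ih =>
    rw [pvParse]
    rw [hfind]
    simp only [pvRender, ih]

lemma render_nil : ∀ ts, pvRender [] ts = pvRebuild ts := by
  intro ts
  induction ts with
  | nil => rfl
  | cons tk ts ih => cases tk <;> simp [pvRender, pvRebuild, ih]

lemma foldl_render (ts : List PvTok) (hwf : pvWF ts) :
    ∀ (todo done : List (List Char × List Char)),
      (∀ q ∈ todo, q ∈ pvPlaceholders) → (∀ q ∈ todo, q ∉ done) → todo.Nodup →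
      List.foldl (fun acc pr => PySem.Chars.replace acc pr.1 pr.2) (pvRender done ts) todo
        = pvRender (todo.reverse ++ done) ts := by
  intro todo
  induction todo with
  | nil => intro done _ _ _; simp
  | cons q todo' ih =>
    intro done hmemall hnd hnodup
    simp only [List.foldl_cons]
    rw [render_step q (hmemall q (by simp)) done (hnd q (by simp)) ts hwf]
    rw [ih (q :: done) (fun r hr => hmemall r (by simp [hr])) ?_ (List.Nodup.of_cons hnodup)]
    · simp
    · intro r hr
      simp only [List.mem_cons]
      rintro (h | h)
      · exact (List.nodup_cons.mp hnodup).1 (h ▸ hr)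
      · exact hnd r (by simp [hr]) h

lemma pv_nodupb : (pvPlaceholders.map Prod.fst).Nodup := by
  decide

lemma chain_eq_scan (t : List Char) :
    List.foldl (fun acc pr => PySem.Chars.replace acc pr.1 pr.2) t pvPlaceholders.reverse
      = pvScan t := by
  have hnodup : pvPlaceholders.reverse.Nodup :=
    List.nodup_reverse.mpr (List.Nodup.of_map Prod.fst pv_nodupb)
  have ht : t = pvRender [] (pvParse t) := by rw [render_nil, rebuild_parse]
  conv_lhs => rw [ht]
  rw [foldl_render (pvParse t) (wf_parse t) pvPlaceholders.reverse []
    (by intro q hq; simpa using hq) (by simp) hnodup]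
  rw [scan_render]
  simp

def pvS : String := "\n        <!DOCTYPE html>\n        <html>\n            <head>\n                <title>Preview</title>\n                <meta content=\"text/html;charset=utf-8\" http-equiv=\"Content-Type\">\n                <meta content=\"utf-8\" http-equiv=\"encoding\">\n            </head>\n            <body>\n            <script>\n                var isPreview = true;\n                //function turkGetParam(requestedVar, defaultVal) {\n                //    if (requestedVar == \"assignmentId\") {\n                //        return \"previewassignment\";\n                //    } else {\n                //        return \"previewuser\";\n                //    }\n                //}\n            </script>\n    "
def pvE : String := "\n            </body>\n        </html>\n    "

lemma pv_rev : pvPlaceholders.reverse = [("${pdf1}".toList, "https://cs.stanford.edu/~jjacobs3/pdb/DOC_0005958911.pdf".toList),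
    ("${pdf2}".toList, "https://cs.stanford.edu/~jjacobs3/pdb/DOC_0005958912.pdf".toList),
    ("${pdf3}".toList, "https://cs.stanford.edu/~jjacobs3/pdb/DOC_0005958913.pdf".toList),
    ("${pdf4}".toList, "https://cs.stanford.edu/~jjacobs3/pdb/DOC_0005958914.pdf".toList),
    ("${pdf5}".toList, "https://cs.stanford.edu/~jjacobs3/pdb/DOC_0005958915.pdf".toList),
    ("${pdf6}".toList, "https://cs.stanford.edu/~jjacobs3/pdb/DOC_0005958916.pdf".toList),
    ("${pdf7}".toList, "https://cs.stanford.edu/~jjacobs3/pdb/DOC_0005958918.pdf".toList),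
    ("${pdf8}".toList, "https://cs.stanford.edu/~jjacobs3/pdb/DOC_0005958920.pdf".toList),
    ("${pdf9}".toList, "https://cs.stanford.edu/~jjacobs3/pdb/DOC_0005958922.pdf".toList),
    ("${pdf10}".toList, "https://cs.stanford.edu/~jjacobs3/pdb/DOC_0005958924.pdf".toList),
    ("${pdf11}".toList, "https://cs.stanford.edu/~jjacobs3/pdb/DOC_0005958926.pdf".toList),
    ("${pdf12}".toList, "https://cs.stanford.edu/~jjacobs3/pdb/DOC_0005958929.pdf".toList),
    ("${pdf13}".toList, "https://cs.stanford.edu/~jjacobs3/pdb/DOC_0005958931.pdf".toList)] := by decide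

lemma B_unfold (b : String) :
    (gen_preview_html_alt b).toList = pvScan (pvS.toList ++ b.toList ++ pvE.toList) := by
  simp only [gen_preview_html_alt, String.toList_ofList, String.toList_append, pvS, pvE]

lemma A_unfold (b : String) :
    (gen_preview_html b).toList =
      List.foldl (fun acc pr => PySem.Chars.replace acc pr.1 pr.2)
        (pvS.toList ++ b.toList ++ pvE.toList) pvPlaceholders.reverse := by
  have hr : PySem.List.pyRange 1 14 1 = [1,2,3,4,5,6,7,8,9,10,11,12,13] := by decide
  have e1 : ("${pdf" ++ PySem.Int.toStr 1 ++ "}") = "${pdf1}" := by decide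
  have e2 : ("${pdf" ++ PySem.Int.toStr 2 ++ "}") = "${pdf2}" := by decide
  have e3 : ("${pdf" ++ PySem.Int.toStr 3 ++ "}") = "${pdf3}" := by decide
  have e4 : ("${pdf" ++ PySem.Int.toStr 4 ++ "}") = "${pdf4}" := by decide
  have e5 : ("${pdf" ++ PySem.Int.toStr 5 ++ "}") = "${pdf5}" := by decide
  have e6 : ("${pdf" ++ PySem.Int.toStr 6 ++ "}") = "${pdf6}" := by decide
  have e7 : ("${pdf" ++ PySem.Int.toStr 7 ++ "}") = "${pdf7}" := by decide
  have e8 : ("${pdf" ++ PySem.Int.toStr 8 ++ "}") = "${pdf8}" := by decide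
  have e9 : ("${pdf" ++ PySem.Int.toStr 9 ++ "}") = "${pdf9}" := by decide
  have e10 : ("${pdf" ++ PySem.Int.toStr 10 ++ "}") = "${pdf10}" := by decide
  have e11 : ("${pdf" ++ PySem.Int.toStr 11 ++ "}") = "${pdf11}" := by decide
  have e12 : ("${pdf" ++ PySem.Int.toStr 12 ++ "}") = "${pdf12}" := by decide
  have e13 : ("${pdf" ++ PySem.Int.toStr 13 ++ "}") = "${pdf13}" := by decide
  have u1 : PySem.List.pyGetD preview_pdfs ((1 : Int) - 1) "" = "https://cs.stanford.edu/~jjacobs3/pdb/DOC_0005958911.pdf" := by decide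
  have u2 : PySem.List.pyGetD preview_pdfs ((2 : Int) - 1) "" = "https://cs.stanford.edu/~jjacobs3/pdb/DOC_0005958912.pdf" := by decide
  have u3 : PySem.List.pyGetD preview_pdfs ((3 : Int) - 1) "" = "https://cs.stanford.edu/~jjacobs3/pdb/DOC_0005958913.pdf" := by decide
  have u4 : PySem.List.pyGetD preview_pdfs ((4 : Int) - 1) "" = "https://cs.stanford.edu/~jjacobs3/pdb/DOC_0005958914.pdf" := by decide
  have u5 : PySem.List.pyGetD preview_pdfs ((5 : Int) - 1) "" = "https://cs.stanford.edu/~jjacobs3/pdb/DOC_0005958915.pdf" := by decide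
  have u6 : PySem.List.pyGetD preview_pdfs ((6 : Int) - 1) "" = "https://cs.stanford.edu/~jjacobs3/pdb/DOC_0005958916.pdf" := by decide
  have u7 : PySem.List.pyGetD preview_pdfs ((7 : Int) - 1) "" = "https://cs.stanford.edu/~jjacobs3/pdb/DOC_0005958918.pdf" := by decide
  have u8 : PySem.List.pyGetD preview_pdfs ((8 : Int) - 1) "" = "https://cs.stanford.edu/~jjacobs3/pdb/DOC_0005958920.pdf" := by decide
  have u9 : PySem.List.pyGetD preview_pdfs ((9 : Int) - 1) "" = "https://cs.stanford.edu/~jjacobs3/pdb/DOC_0005958922.pdf" := by decide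
  have u10 : PySem.List.pyGetD preview_pdfs ((10 : Int) - 1) "" = "https://cs.stanford.edu/~jjacobs3/pdb/DOC_0005958924.pdf" := by decide
  have u11 : PySem.List.pyGetD preview_pdfs ((11 : Int) - 1) "" = "https://cs.stanford.edu/~jjacobs3/pdb/DOC_0005958926.pdf" := by decide
  have u12 : PySem.List.pyGetD preview_pdfs ((12 : Int) - 1) "" = "https://cs.stanford.edu/~jjacobs3/pdb/DOC_0005958929.pdf" := by decide
  have u13 : PySem.List.pyGetD preview_pdfs ((13 : Int) - 1) "" = "https://cs.stanford.edu/~jjacobs3/pdb/DOC_0005958931.pdf" := by decide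
  rw [pv_rev]
  simp only [gen_preview_html, hr, List.foldl_cons, List.foldl_nil, e1, e2, e3, e4, e5, e6, e7, e8, e9, e10, e11, e12, e13, u1, u2, u3, u4, u5, u6, u7, u8, u9, u10, u11, u12, u13,
    PySem.Str.toList_replace, String.toList_append, pvS, pvE]


-- ===== VERDICT (by name: the statement is the Claim_ definition above) =====
theorem gen_preview_html_spec : Claim_equal_gen_preview_html := by
  intro b _
  unfold Spec_gen_preview_html
  apply String.toList_inj.mp
  rw [A_unfold, chain_eq_scan, B_unfold]
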